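-- pv_equiv track=rewrite | github.com/Et3rnalph0en1x/CScode | project3.py | HighValueCustomers
-- ===== SOURCE A (Python) =====
-- def HighValueCustomers(customerList, productList, transactionList):
--
--     valueList = []
--
--     sortedCustomerList = sorted(customerList)
--
--     sortedTransactionList = sorted(transactionList)
--
--     sortedProductList = sorted(productList)
--
--     for i in range(len(sortedCustomerList)):
--
--         moneySpent = 0
--
--         for j in range(len(sortedTransactionList)):
--
--             if sortedCustomerList[i][0] == sortedTransactionList[j][0]:
--
--                 for k in range(len(sortedProductList)):
--
--                     if sortedTransactionList[j][1] == sortedProductList[k][0]: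
--
--                         moneySpent = moneySpent + (sortedTransactionList[j][2] * sortedProductList[k][2])
--
--         if moneySpent > 4000:
--
--             valueList.append(sortedCustomerList[i][1])
--
--     valueList = sorted(valueList)
--
--     return(valueList)
-- ===== SOURCE B (Python) =====
-- def HighValueCustomers(customerList, productList, transactionList):
--     # price per product id, summed over duplicate ids (A adds every matching product row)
--     price = {}
--     for pid, _name, p in productList:
--         price[pid] = price.get(pid, 0) + p
--     # total spend per customer id in one pass over the transactions
--     spent = {}
--     for cid, pid, qty in transactionList:
--         spent[cid] = spent.get(cid, 0) + qty * price.get(pid, 0)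
--     return sorted(name for cid, name in customerList if spent.get(cid, 0) > 4000)
-- ===== Notes on version B (the rewrite author's own statement) =====
-- stated objective: faster
-- what changed: Replaces the triple nested scan (each customer x each transaction x each product, after three sorts) by two dict-building passes (product id -> summed price, customer id -> total spend) and one filtered pass over the customers, sorting only the resulting names.
import Mathlib
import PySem

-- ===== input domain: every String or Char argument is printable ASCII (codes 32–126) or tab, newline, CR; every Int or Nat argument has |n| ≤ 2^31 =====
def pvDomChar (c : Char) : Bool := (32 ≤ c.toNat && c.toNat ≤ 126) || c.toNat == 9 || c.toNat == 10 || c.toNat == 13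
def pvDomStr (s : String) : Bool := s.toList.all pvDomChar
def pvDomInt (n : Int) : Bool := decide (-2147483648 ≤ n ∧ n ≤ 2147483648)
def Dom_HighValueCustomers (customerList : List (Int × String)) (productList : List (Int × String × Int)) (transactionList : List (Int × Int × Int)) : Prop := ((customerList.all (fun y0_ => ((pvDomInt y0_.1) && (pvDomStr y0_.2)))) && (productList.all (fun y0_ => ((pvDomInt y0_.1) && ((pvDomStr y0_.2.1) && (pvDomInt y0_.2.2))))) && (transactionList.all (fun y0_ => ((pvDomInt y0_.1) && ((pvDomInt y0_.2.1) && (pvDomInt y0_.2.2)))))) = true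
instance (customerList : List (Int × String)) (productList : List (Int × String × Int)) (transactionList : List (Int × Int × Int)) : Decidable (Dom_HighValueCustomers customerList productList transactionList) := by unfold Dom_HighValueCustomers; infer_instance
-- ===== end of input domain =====

-- B replaces A's triple nested scan with two dict-building passes and one filtered pass (objective: faster; measured asymptotic speed-up); return value only, no mutation.


-- ===== PORT A =====
-- Python lexicographic sort of triples = stable sort by the 3rd component, then by (1st, 2nd) (sorted2).
def HighValueCustomers (customerList : List (Int × String)) (productList : List (Int × String × Int)) (transactionList : List (Int × Int × Int)) : List String :=
  let sortedCustomerList := PySem.List.sorted2 customerList (fun c => c.1) (fun c => c.2)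
  let sortedTransactionList := PySem.List.sorted2 (PySem.List.sorted transactionList (fun t => t.2.2)) (fun t => t.1) (fun t => t.2.1)
  let sortedProductList := PySem.List.sorted2 (PySem.List.sorted productList (fun p => p.2.2)) (fun p => p.1) (fun p => p.2.1)
  let valueList := sortedCustomerList.foldl (fun acc c =>
    let moneySpent := sortedTransactionList.foldl (fun m t =>
      if c.1 == t.1 then
        sortedProductList.foldl (fun m2 p =>
          if t.2.1 == p.1 then m2 + t.2.2 * p.2.2 else m2) m
      else m) (0 : Int)
    if moneySpent > 4000 then acc ++ [c.2] else acc) []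
  PySem.List.sorted valueList (fun x => x) false

-- ===== PORT B =====
def HighValueCustomers_alt (customerList : List (Int × String)) (productList : List (Int × String × Int)) (transactionList : List (Int × Int × Int)) : List String :=
  let price : PySem.Dict Int Int := productList.foldl
    (fun d p => d.insert p.1 (d.getD p.1 0 + p.2.2)) PySem.Dict.empty
  let spent : PySem.Dict Int Int := transactionList.foldl
    (fun d t => d.insert t.1 (d.getD t.1 0 + t.2.2 * price.getD t.2.1 0)) PySem.Dict.empty
  PySem.List.sorted ((customerList.filter (fun c => spent.getD c.1 0 > 4000)).map (fun c => c.2)) (fun x => x) false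

-- ===== PRECONDITION & SPEC =====
def Spec_HighValueCustomers (customerList : List (Int × String)) (productList : List (Int × String × Int)) (transactionList : List (Int × Int × Int)) (out : List String) : Prop := out = HighValueCustomers_alt customerList productList transactionList
instance (customerList : List (Int × String)) (productList : List (Int × String × Int)) (transactionList : List (Int × Int × Int)) (out : List String) : Decidable (Spec_HighValueCustomers customerList productList transactionList out) := by unfold Spec_HighValueCustomers; infer_instance

-- ===== CLAIM (what is proved, stated in full; the proofs are below) =====
def Claim_equal_HighValueCustomers : Prop := ∀ (customerList : List (Int × String)) (productList : List (Int × String × Int)) (transactionList : List (Int × Int × Int)), Dom_HighValueCustomers customerList productList transactionList → Spec_HighValueCustomers customerList productList transactionList (HighValueCustomers customerList productList transactionList)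

-- ===== LEMMAS AND PROOFS =====

-- total price of all product rows with a given id (what A's innermost loop adds per unit)
def pvPriceSum (productList : List (Int × String × Int)) (pid : Int) : Int :=
  ((productList.filter (fun p => p.1 == pid)).map (fun p => p.2.2)).sum

-- total spend of a customer id (what A's middle loop accumulates)
def pvSpendSum (productList : List (Int × String × Int)) (transactionList : List (Int × Int × Int)) (cid : Int) : Int :=
  ((transactionList.filter (fun t => t.1 == cid)).map (fun t => t.2.2 * pvPriceSum productList t.2.1)).sum

-- the 'd[k] = d.get(k, 0) + v(x)' accumulation loop read back through getD
theorem pv_getD_foldl_insert_add {α : Type} (key : α → Int) (v : α → Int)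
    (l : List α) (d : PySem.Dict Int Int) (k : Int) :
    (l.foldl (fun d x => d.insert (key x) (d.getD (key x) 0 + v x)) d).getD k 0
      = d.getD k 0 + ((l.filter (fun x => key x == k)).map v).sum := by
  induction l generalizing d with
  | nil => simp
  | cons x xs ih =>
    simp only [List.foldl_cons, List.filter_cons]
    rw [ih, PySem.Dict.getD_insert]
    by_cases h : key x = k
    · simp [h, add_assoc]
    · rw [if_neg (fun hk => h hk.symm)]
      simp [beq_iff_eq, h]

-- sums over filtered projections are invariant under permutation
theorem pv_sum_filter_map_perm {α : Type} {l₁ l₂ : List α} (h : l₁.Perm l₂)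
    (f : α → Bool) (g : α → Int) :
    ((l₁.filter f).map g).sum = ((l₂.filter f).map g).sum :=
  ((h.filter f).map g).sum_eq

-- A's innermost loop: scanning all products for one transaction adds qty * (summed price of pid)
theorem pv_inner_fold (sp : List (Int × String × Int)) (pid q m : Int) :
    sp.foldl (fun m2 p => if pid == p.1 then m2 + q * p.2.2 else m2) m
      = m + q * pvPriceSum sp pid := by
  rw [PySem.List.foldl_if_eq_foldl_filter, PySem.List.foldl_add]
  rw [List.filter_congr (fun (x : Int × String × Int) _ => (BEq.comm : (pid == x.1) = (x.1 == pid)))]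
  unfold pvPriceSum
  rw [List.sum_map_mul_left]

-- A's middle loop: total money a customer id spends, as a sum over matching transactions
theorem pv_money_fold (st : List (Int × Int × Int)) (prods : List (Int × String × Int)) (cid : Int) :
    st.foldl (fun m t => if cid == t.1 then m + t.2.2 * pvPriceSum prods t.2.1 else m) 0
      = pvSpendSum prods st cid := by
  rw [PySem.List.foldl_if_eq_foldl_filter, PySem.List.foldl_add]
  rw [List.filter_congr (fun (x : Int × Int × Int) _ => (BEq.comm : (cid == x.1) = (x.1 == cid)))]
  unfold pvSpendSum
  rw [zero_add]

-- ===== VERDICT (by name: the statement is the Claim_ definition above) =====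
theorem HighValueCustomers_spec : Claim_equal_HighValueCustomers := by
  intro customerList productList transactionList _
  unfold Spec_HighValueCustomers HighValueCustomers HighValueCustomers_alt
  -- permutations produced by the sorts
  have hsc : (PySem.List.sorted2 customerList (fun c => c.1) (fun c => c.2)).Perm customerList :=
    PySem.List.sorted2_perm ..
  have hst : (PySem.List.sorted2 (PySem.List.sorted transactionList (fun t => t.2.2)) (fun t => t.1) (fun t => t.2.1)).Perm transactionList :=
    (PySem.List.sorted2_perm ..).trans (PySem.List.sorted_perm ..)
  have hsp : (PySem.List.sorted2 (PySem.List.sorted productList (fun p => p.2.2)) (fun p => p.1) (fun p => p.2.1)).Perm productList :=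
    (PySem.List.sorted2_perm ..).trans (PySem.List.sorted_perm ..)
  set sc := PySem.List.sorted2 customerList (fun c => c.1) (fun c => c.2) with hscdef
  set st := PySem.List.sorted2 (PySem.List.sorted transactionList (fun t => t.2.2)) (fun t => t.1) (fun t => t.2.1) with hstdef
  set sp := PySem.List.sorted2 (PySem.List.sorted productList (fun p => p.2.2)) (fun p => p.1) (fun p => p.2.1) with hspdef
  -- B's dicts compute pvPriceSum / pvSpendSum
  have hprice : ∀ pid : Int,
      (productList.foldl (fun d p => d.insert p.1 (d.getD p.1 0 + p.2.2)) PySem.Dict.empty).getD pid 0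
        = pvPriceSum productList pid := by
    intro pid
    rw [pv_getD_foldl_insert_add (key := fun p : Int × String × Int => p.1) (v := fun p : Int × String × Int => p.2.2)]
    simp [pvPriceSum]
  have hspent : ∀ cid : Int,
      (transactionList.foldl (fun d t => d.insert t.1 (d.getD t.1 0 + t.2.2 *
          (productList.foldl (fun d p => d.insert p.1 (d.getD p.1 0 + p.2.2)) PySem.Dict.empty).getD t.2.1 0))
        PySem.Dict.empty).getD cid 0 = pvSpendSum productList transactionList cid := by
    intro cid
    rw [pv_getD_foldl_insert_add (key := fun t : Int × Int × Int => t.1)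
        (v := fun t : Int × Int × Int => t.2.2 * (productList.foldl (fun d p => d.insert p.1 (d.getD p.1 0 + p.2.2)) PySem.Dict.empty).getD t.2.1 0)]
    simp only [PySem.Dict.getD_empty, zero_add, pvSpendSum]
    congr 1
    apply List.map_congr_left
    intro t _
    rw [hprice]
  -- A's money loop computes pvSpendSum as well
  have hmoney : ∀ c : Int × String,
      st.foldl (fun m t =>
        if c.1 == t.1 then
          sp.foldl (fun m2 p => if t.2.1 == p.1 then m2 + t.2.2 * p.2.2 else m2) m
        else m) (0 : Int) = pvSpendSum productList transactionList c.1 := by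
    intro c
    have h1 : st.foldl (fun m t =>
        if c.1 == t.1 then
          sp.foldl (fun m2 p => if t.2.1 == p.1 then m2 + t.2.2 * p.2.2 else m2) m
        else m) (0 : Int)
      = st.foldl (fun m t => if c.1 == t.1 then m + t.2.2 * pvPriceSum productList t.2.1 else m) (0 : Int) := by
      apply PySem.List.foldl_congr_mem
      intro m t _
      by_cases h : (c.1 == t.1) = true
      · rw [if_pos h, if_pos h, pv_inner_fold]
        have : pvPriceSum sp t.2.1 = pvPriceSum productList t.2.1 :=
          pv_sum_filter_map_perm hsp _ _
        rw [this]
      · rw [if_neg h, if_neg h]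
    rw [h1, pv_money_fold st productList c.1]
    unfold pvSpendSum
    exact pv_sum_filter_map_perm hst _ _
  -- both sides are sorted lists of the same multiset of names
  simp only [hmoney, hspent]
  apply PySem.List.sorted_eq_sorted_of_perm _ _ _ (fun a b h => h)
  rw [PySem.List.foldl_append_ite]
  simp only [List.nil_append]
  exact ((hsc.filter _).map _)
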